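-- pv_equiv track=rewrite | github.com/xiao2003/Labdetector | pc/desktop_app.py | _configurable_backend_rows
-- ===== SOURCE A (Python) =====
-- from typing import Any, Callable, Dict, List
--
-- CONFIG_BACKENDS: List[str] = ["qwen", "deepseek", "kimi"]
--
-- BACKEND_LABEL_OVERRIDES: Dict[str, str] = {
--     "ollama": "Ollama",
--     "local_adapter": "本地模型框架",
--     "qwen": "通义千问（需在模型配置页面添加 API Key）",
--     "deepseek": "DeepSeek（需在模型配置页面添加 API Key）",
--     "kimi": "Kimi（需在模型配置页面添加 API Key）",
-- }
--
-- def _configurable_backend_rows(rows: List[Dict[str, str]]) -> List[Dict[str, str]]: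
--     by_backend: Dict[str, Dict[str, str]] = {}
--     for row in rows:
--         backend = str(row.get("value") or row.get("backend") or "")
--         if backend not in CONFIG_BACKENDS:
--             continue
--         label = BACKEND_LABEL_OVERRIDES.get(backend, str(row.get("label") or backend))
--         normalized = dict(row)
--         normalized["label"] = label
--         by_backend[backend] = normalized
--     filtered: List[Dict[str, str]] = []
--     for backend in CONFIG_BACKENDS:
--         row = by_backend.get(backend)
--         if row is not None:
--             filtered.append(row)
--     return filtered
-- ===== SOURCE B (Python) =====
-- from typing import Dict, List
--
-- CONFIG_BACKENDS: List[str] = ["qwen", "deepseek", "kimi"]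
--
-- BACKEND_LABEL_OVERRIDES: Dict[str, str] = {
--     "ollama": "Ollama",
--     "local_adapter": "本地模型框架",
--     "qwen": "通义千问（需在模型配置页面添加 API Key）",
--     "deepseek": "DeepSeek（需在模型配置页面添加 API Key）",
--     "kimi": "Kimi（需在模型配置页面添加 API Key）",
-- }
--
-- def _configurable_backend_rows(rows: List[Dict[str, str]]) -> List[Dict[str, str]]:
--     # Outer loop over configured backends; keep the LAST matching row per backend.
--     filtered: List[Dict[str, str]] = []
--     for backend in CONFIG_BACKENDS:
--         match = None
--         for row in rows:
--             if str(row.get("value") or row.get("backend") or "") == backend: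
--                 match = row
--         if match is not None:
--             normalized = dict(match)
--             normalized["label"] = BACKEND_LABEL_OVERRIDES.get(
--                 backend, str(match.get("label") or backend)
--             )
--             filtered.append(normalized)
--     return filtered
-- ===== Notes on version B (the rewrite author's own statement) =====
-- stated objective: alternative
-- what changed: Inverted the passes: instead of building a by_backend index dict over the rows and then reading it off in CONFIG_BACKENDS order, B loops over CONFIG_BACKENDS and for each backend scans the rows keeping the last matching row, normalizing only the kept row.
import Mathlib
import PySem

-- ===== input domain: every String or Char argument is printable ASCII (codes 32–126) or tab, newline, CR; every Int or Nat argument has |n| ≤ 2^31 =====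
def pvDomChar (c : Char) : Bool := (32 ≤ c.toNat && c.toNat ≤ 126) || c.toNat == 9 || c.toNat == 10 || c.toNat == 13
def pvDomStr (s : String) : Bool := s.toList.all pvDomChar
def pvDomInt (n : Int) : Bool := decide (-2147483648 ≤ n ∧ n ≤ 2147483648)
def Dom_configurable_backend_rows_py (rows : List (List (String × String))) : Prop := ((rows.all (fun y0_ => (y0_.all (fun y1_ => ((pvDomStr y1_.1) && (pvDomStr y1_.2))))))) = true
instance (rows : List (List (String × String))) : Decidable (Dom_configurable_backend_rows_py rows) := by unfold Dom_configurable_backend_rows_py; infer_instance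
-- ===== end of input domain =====

-- B inverts the passes of A: the outer loop runs over CONFIG_BACKENDS and for each backend B
-- scans the rows keeping the last matching row; same return value, no index dict.

-- shared module constants (verbatim from the Python module) and the shared
-- extraction/normalization expressions both Pythons contain verbatim
def pvConfigBackends : List String := ["qwen", "deepseek", "kimi"]

def pvLabelOverrides : PySem.Dict String String := PySem.Dict.mk
  [("ollama", "Ollama"),
   ("local_adapter", "本地模型框架"),
   ("qwen", "通义千问（需在模型配置页面添加 API Key）"),
   ("deepseek", "DeepSeek（需在模型配置页面添加 API Key）"),
   ("kimi", "Kimi（需在模型配置页面添加 API Key）")]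

-- Python `x or y` for an Optional[str] x: falsy = None or ""
def pvOrStr (a : Option String) (b : String) : String :=
  match a with
  | some s => if s = "" then b else s
  | none => b

-- str(row.get("value") or row.get("backend") or "")
def pvExtract (row : List (String × String)) : String :=
  pvOrStr ((PySem.Dict.mk row).get? "value") (pvOrStr ((PySem.Dict.mk row).get? "backend") "")

-- BACKEND_LABEL_OVERRIDES.get(backend, str(row.get("label") or backend))
def pvLabel (row : List (String × String)) (backend : String) : String :=
  pvLabelOverrides.getD backend (pvOrStr ((PySem.Dict.mk row).get? "label") backend)

-- normalized = dict(row); normalized["label"] = label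
def pvNormalize (row : List (String × String)) (backend : String) : List (String × String) :=
  ((PySem.Dict.mk row).insert "label" (pvLabel row backend)).items

-- ===== PORT A =====
def configurable_backend_rows_py (rows : List (List (String × String))) : List (List (String × String)) :=
  let by_backend : PySem.Dict String (List (String × String)) :=
    rows.foldl (fun d row =>
      let backend := pvExtract row
      if backend ∈ pvConfigBackends then d.insert backend (pvNormalize row backend) else d)
      PySem.Dict.empty
  pvConfigBackends.foldl (fun acc backend =>
    match by_backend.get? backend with
    | some row => acc ++ [row]
    | none => acc) []

-- ===== PORT B =====
-- last row of rows whose extracted backend equals b (inner scan of B)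
def pvLastMatch (b : String) (rows : List (List (String × String))) : Option (List (String × String)) :=
  rows.foldl (fun acc row => if pvExtract row = b then some row else acc) none

def configurable_backend_rows_py_alt (rows : List (List (String × String))) : List (List (String × String)) :=
  pvConfigBackends.foldl (fun acc backend =>
    match pvLastMatch backend rows with
    | some row => acc ++ [pvNormalize row backend]
    | none => acc) []

-- ===== PRECONDITION & SPEC =====
def Spec_configurable_backend_rows_py (rows : List (List (String × String))) (out : List (List (String × String))) : Prop := out = configurable_backend_rows_py_alt rows
instance (rows : List (List (String × String))) (out : List (List (String × String))) : Decidable (Spec_configurable_backend_rows_py rows out) := by unfold Spec_configurable_backend_rows_py; infer_instance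

-- ===== CLAIM (what is proved, stated in full; the proofs are below) =====
def Claim_equal_configurable_backend_rows_py : Prop := ∀ (rows : List (List (String × String))), Dom_configurable_backend_rows_py rows → Spec_configurable_backend_rows_py rows (configurable_backend_rows_py rows)

-- ===== LEMMAS AND PROOFS =====

-- the accumulator of B's inner scan is only returned when no row matches
lemma lastMatch_acc (b : String) (rows : List (List (String × String)))
    (acc : Option (List (String × String))) :
    rows.foldl (fun a row => if pvExtract row = b then some row else a) acc
      = (rows.foldl (fun a row => if pvExtract row = b then some row else a) none).or acc := by
  induction rows generalizing acc with
  | nil => simp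
  | cons r rest ih =>
    simp only [List.foldl_cons]
    rw [ih, ih (if pvExtract r = b then some r else none)]
    cases h : rest.foldl (fun a row => if pvExtract row = b then some row else a) none <;>
      split <;> simp [Option.or]

lemma lastMatch_cons (b : String) (r : List (String × String)) (rest : List (List (String × String))) :
    pvLastMatch b (r :: rest)
      = (pvLastMatch b rest).or (if pvExtract r = b then some r else none) := by
  unfold pvLastMatch
  simp only [List.foldl_cons]
  exact lastMatch_acc b rest _

-- A's index dict, read at a configured backend, is the normalization of B's last match
lemma getA_eq_lastMatch (b : String) (hb : b ∈ pvConfigBackends) :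
    ∀ (rows : List (List (String × String))) (d : PySem.Dict String (List (String × String))),
    (rows.foldl (fun d row =>
        let backend := pvExtract row
        if backend ∈ pvConfigBackends then d.insert backend (pvNormalize row backend) else d) d).get? b
      = match pvLastMatch b rows with
        | some r => some (pvNormalize r b)
        | none => d.get? b := by
  intro rows
  induction rows with
  | nil => intro d; simp [pvLastMatch]
  | cons r rest ih =>
    intro d
    simp only [List.foldl_cons]
    rw [ih, lastMatch_cons]
    by_cases hx : pvExtract r = b
    · subst hx
      simp only [if_pos hb]
      cases h : pvLastMatch (pvExtract r) rest with
      | some s => simp [Option.or]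
      | none => simp [Option.or, PySem.Dict.get?_insert_self]
    · have hget :
          (if pvExtract r ∈ pvConfigBackends then d.insert (pvExtract r) (pvNormalize r (pvExtract r)) else d).get? b = d.get? b := by
        split
        · exact PySem.Dict.get?_insert_of_ne _ _ (fun h => hx h.symm)
        · rfl
      cases h : pvLastMatch b rest with
      | some s => simp [Option.or]
      | none => simp [if_neg hx, Option.or, hget]

-- ===== VERDICT (by name: the statement is the Claim_ definition above) =====
theorem configurable_backend_rows_py_spec : Claim_equal_configurable_backend_rows_py := by
  intro rows _
  unfold Spec_configurable_backend_rows_py configurable_backend_rows_py configurable_backend_rows_py_alt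
  have hq := getA_eq_lastMatch "qwen" (by decide) rows PySem.Dict.empty
  have hd := getA_eq_lastMatch "deepseek" (by decide) rows PySem.Dict.empty
  have hk := getA_eq_lastMatch "kimi" (by decide) rows PySem.Dict.empty
  simp only [pvConfigBackends, List.foldl_cons, List.foldl_nil] at *
  rw [hq, hd, hk]
  cases pvLastMatch "qwen" rows <;> cases pvLastMatch "deepseek" rows <;>
    cases pvLastMatch "kimi" rows <;> simp [PySem.Dict.get?_empty]
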